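-- pv_equiv track=rewrite | github.com/MeryTouceda/be434-fall-2021 | assignments/10_conserved/conserved.py | create_alignment
-- ===== SOURCE A (Python) =====
-- def create_alignment(sequences):
--     """ Makes alingment:
--     takes: a file with multiple sequences
--     returns: the character sequence of an alignment as a str
--     (X) = no alignment
--     (|) = alignment, identical bases in this position"""
--
--     number_sequences = len(sequences)
--     alignment = []
--
--     for i in range(0, len(sequences[0])):
--         combo = []
--         for k in range(0, number_sequences):
--             combo.append(sequences[k][i])
--         if all(element == combo[0] for element in combo):
--             alignment.append('|')
--         else:
--             alignment.append('X')
--     # return(len(alignment))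
--     return ''.join(alignment)
-- ===== SOURCE B (Python) =====
-- def create_alignment(sequences):
--     """Row-major accumulating pass: start from all-'|' and mark mismatching
--     columns 'X' while scanning each sequence against the first one."""
--     reference = sequences[0]
--     result = ['|'] * len(reference)
--     for seq in sequences[1:]:
--         for i in range(len(reference)):
--             if seq[i] != reference[i]:
--                 result[i] = 'X'
--     return ''.join(result)
-- ===== Notes on version B (the rewrite author's own statement) =====
-- stated objective: alternative
-- what changed: B replaces A's column-by-column build (inner loop collecting a combo list per column, then an all() check) with a row-major accumulating pass: a '|'-filled result array is overwritten with 'X' wherever any later sequence differs from the first one at that index.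
import Mathlib
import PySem

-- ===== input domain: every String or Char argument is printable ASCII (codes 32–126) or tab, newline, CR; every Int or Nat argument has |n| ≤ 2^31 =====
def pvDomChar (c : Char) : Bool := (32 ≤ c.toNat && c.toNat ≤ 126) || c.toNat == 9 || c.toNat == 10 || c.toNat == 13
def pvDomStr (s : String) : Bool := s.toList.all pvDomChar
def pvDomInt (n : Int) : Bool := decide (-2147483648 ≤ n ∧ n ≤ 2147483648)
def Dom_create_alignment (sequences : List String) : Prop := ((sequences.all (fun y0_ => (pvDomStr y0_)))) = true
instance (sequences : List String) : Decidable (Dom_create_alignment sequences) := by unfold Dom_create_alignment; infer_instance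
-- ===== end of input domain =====

-- B replaces A's column-by-column combo build with a row-major pass that overwrites a '|'-filled
-- result with 'X' at mismatching columns; same asymptotic cost, different decomposition.


-- ===== PORT A =====
-- column-by-column: for each column i collect combo = [seq[i] for seq in sequences], emit '|' iff all equal combo[0]
def create_alignment (sequences : List String) : String :=
  let number_sequences : Int := sequences.length
  let s0 : List Char := (PySem.List.pyGetD sequences 0 "").toList   -- sequences[0]; Pre_ excludes the IndexError
  let alignment : List Char :=
    (PySem.List.pyRange 0 (s0.length : Int) 1).foldl (fun al i =>
      let combo : List Char :=
        (PySem.List.pyRange 0 number_sequences 1).foldl (fun c k =>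
          c ++ [PySem.List.pyGetD (PySem.List.pyGetD sequences k "").toList i ' ']) []
      if combo.all (fun e => e == PySem.List.pyGetD combo 0 ' ') then al ++ ['|'] else al ++ ['X'])
      []
  String.ofList alignment

-- ===== PORT B =====
-- row-major: start from all-'|', overwrite with 'X' where a later sequence differs from the first
def create_alignment_alt (sequences : List String) : String :=
  let reference : List Char := (PySem.List.pyGetD sequences 0 "").toList   -- sequences[0]; Pre_ excludes the IndexError
  let result0 : List Char := List.replicate reference.length '|'
  let result : List Char :=
    (PySem.List.slice sequences (some 1) none).foldl (fun res s =>
      (PySem.List.pyRange 0 (reference.length : Int) 1).foldl (fun r i =>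
        if PySem.List.pyGetD s.toList i ' ' ≠ PySem.List.pyGetD reference i ' '
        then r.set i.toNat 'X' else r) res) result0
  String.ofList result

-- ===== PRECONDITION & SPEC =====
-- Pre_ excludes exactly the inputs on which Python A raises IndexError: the empty list
-- (sequences[0]) and ragged inputs where some sequence is shorter than sequences[0].
def Pre_create_alignment (sequences : List String) : Prop :=
  sequences ≠ [] ∧ ∀ s ∈ sequences, (sequences.headD "").toList.length ≤ s.toList.length
instance (sequences : List String) : Decidable (Pre_create_alignment sequences) := by
  unfold Pre_create_alignment; infer_instance
def pvWitness_create_alignment : List String := ["GATT", "GCTA", "GAGT"]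

def Spec_create_alignment (sequences : List String) (out : String) : Prop := out = create_alignment_alt sequences
instance (sequences : List String) (out : String) : Decidable (Spec_create_alignment sequences out) := by unfold Spec_create_alignment; infer_instance

-- ===== CLAIM (what is proved, stated in full; the proofs are below) =====
def Claim_equal_create_alignment : Prop := ∀ (sequences : List String), Dom_create_alignment sequences → Pre_create_alignment sequences → Spec_create_alignment sequences (create_alignment sequences)

-- ===== LEMMAS AND PROOFS =====

-- A's outer loop shape: append '|' or 'X' per index = map of the per-index character
theorem foldl_if_append_pipe (P : Int → Bool) (l : List Int) (acc : List Char) :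
    l.foldl (fun al i => if P i then al ++ ['|'] else al ++ ['X']) acc
      = acc ++ l.map (fun i => if P i then '|' else 'X') := by
  induction l generalizing acc with
  | nil => simp
  | cons x xs ih => by_cases h : P x <;> simp [h, ih]

-- the common normal form both ports are reduced to
def colmap (s0 : List Char) (rest : List String) : List Char :=
  (List.range s0.length).map (fun (j : Nat) =>
    if rest.all (fun s =>
        PySem.List.pyGetD s.toList (j : Int) ' ' == PySem.List.pyGetD s0 (j : Int) ' ')
    then '|' else 'X')

-- A reduced to the normal form
theorem A_char (s0 : String) (rest : List String) :
    create_alignment (s0 :: rest) = String.ofList (colmap s0.toList rest) := by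
  unfold create_alignment colmap
  have hget0 : PySem.List.pyGetD (s0 :: rest) 0 "" = s0 := by
    simp [PySem.List.pyGetD, PySem.List.pyGet?, PySem.List.pyIdx?]
  simp only [hget0]
  -- rewrite the inner combo fold: it is the list of column-i characters over all sequences
  have hinner : ∀ i : Int,
      (PySem.List.pyRange 0 ((s0 :: rest).length : Int) 1).foldl (fun c k =>
          c ++ [PySem.List.pyGetD (PySem.List.pyGetD (s0 :: rest) k "").toList i ' ']) []
        = (s0 :: rest).map (fun s => PySem.List.pyGetD s.toList i ' ') := by
    intro i
    rw [PySem.List.foldl_pyRange_zero_pyGetD' (s0 :: rest) ""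
        (fun c s => c ++ [PySem.List.pyGetD s.toList i ' ']) []]
    rw [PySem.List.foldl_append_singleton_eq_map]
    simp
  have hstep : ∀ (al : List Char), ∀ i ∈ PySem.List.pyRange 0 (s0.toList.length : Int) 1,
      (let combo : List Char :=
          (PySem.List.pyRange 0 ((s0 :: rest).length : Int) 1).foldl (fun c k =>
            c ++ [PySem.List.pyGetD (PySem.List.pyGetD (s0 :: rest) k "").toList i ' ']) []
       if combo.all (fun e => e == PySem.List.pyGetD combo 0 ' ') then al ++ ['|'] else al ++ ['X'])
      = (if rest.all (fun s => PySem.List.pyGetD s.toList i ' ' == PySem.List.pyGetD s0.toList i ' ')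
         then al ++ ['|'] else al ++ ['X']) := by
    intro al i _
    simp only [hinner]
    have h0 : ∀ (c0 : Char) (cs : List Char), PySem.List.pyGetD (c0 :: cs) 0 ' ' = c0 := by
      intro c0 cs
      simp [PySem.List.pyGetD, PySem.List.pyGet?, PySem.List.pyIdx?]
    simp only [List.map_cons, h0, List.all_cons, beq_self_eq_true, Bool.true_and, List.all_map]
    rfl
  rw [List.foldl_ext _ _ _ hstep]
  rw [foldl_if_append_pipe (fun i => rest.all (fun s =>
      PySem.List.pyGetD s.toList i ' ' == PySem.List.pyGetD s0.toList i ' '))]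
  rw [PySem.List.pyRange_zero_nat, List.map_map]
  simp only [List.nil_append]
  rfl

-- setting one cell of a range-map is a range-map of the pointwise-updated function
theorem set_map_range {n : Nat} (m : Nat) (f : Nat → Char) (x : Char) (_hm : m < n) :
    ((List.range n).map f).set m x
      = (List.range n).map (fun j => if j = m then x else f j) := by
  apply List.ext_getElem
  · simp
  · intro j h1 h2
    simp only [List.getElem_set, List.getElem_map, List.getElem_range]
    split_ifs with h3 h4 h4
    · rfl
    · exact absurd h3.symm h4
    · exact absurd h4.symm h3
    · rfl

-- B's inner loop: marking mismatches of one sequence over range m updates the column predicate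
theorem inner_setfold (c : Nat → Prop) [DecidablePred c] (q : Nat → Bool) (n : Nat) :
    ∀ m, m ≤ n →
    (List.range m).foldl (fun r j => if c j then r.set j 'X' else r)
        ((List.range n).map (fun j => if q j then '|' else 'X'))
      = (List.range n).map (fun j => if j < m ∧ c j then 'X'
          else if q j then '|' else 'X') := by
  intro m hm
  induction m with
  | zero =>
    simp only [List.range_zero, List.foldl_nil]
    apply List.map_congr_left
    intro j hj
    have hne : ¬(j < 0 ∧ c j) := by rintro ⟨h, -⟩; omega
    rw [if_neg hne]
  | succ m ih =>
    rw [List.range_succ, List.foldl_append, ih (by omega)]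
    simp only [List.foldl_cons, List.foldl_nil]
    by_cases hc : c m
    · rw [if_pos hc, set_map_range m _ _ (by omega)]
      apply List.map_congr_left
      intro j hj
      by_cases hjm : j = m
      · subst hjm
        rw [if_pos rfl, if_pos ⟨Nat.lt_succ_self j, hc⟩]
      · rw [if_neg hjm]
        have hiff : (j < m + 1 ∧ c j) ↔ (j < m ∧ c j) := by
          constructor
          · rintro ⟨h1, h2⟩; exact ⟨by omega, h2⟩
          · rintro ⟨h1, h2⟩; exact ⟨by omega, h2⟩
        simp only [hiff]
    · rw [if_neg hc]
      apply List.map_congr_left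
      intro j hj
      have hiff : (j < m + 1 ∧ c j) ↔ (j < m ∧ c j) := by
        constructor
        · rintro ⟨h1, h2⟩
          refine ⟨?_, h2⟩
          rcases Nat.lt_succ_iff_lt_or_eq.mp h1 with h | h
          · exact h
          · exact absurd (h ▸ h2) hc
        · rintro ⟨h1, h2⟩; exact ⟨by omega, h2⟩
      simp only [hiff]

-- B's outer loop: folding the remaining sequences conjoins their match predicates
theorem outer_fold (ref : List Char) (n : Nat) :
    ∀ (rest : List String) (q : Nat → Bool),
    rest.foldl (fun res s =>
        (List.range n).foldl (fun (r : List Char) (j : Nat) =>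
          if PySem.List.pyGetD s.toList (j : Int) ' ' ≠ PySem.List.pyGetD ref (j : Int) ' '
          then r.set j 'X' else r) res)
        ((List.range n).map (fun j => if q j then '|' else 'X'))
      = (List.range n).map (fun j =>
          if q j && rest.all (fun s =>
              PySem.List.pyGetD s.toList (j : Int) ' ' == PySem.List.pyGetD ref (j : Int) ' ')
          then '|' else 'X') := by
  intro rest
  induction rest with
  | nil => simp
  | cons s rest ih =>
    intro q
    simp only [List.foldl_cons]
    rw [inner_setfold (fun j => PySem.List.pyGetD s.toList (j : Int) ' ' ≠ PySem.List.pyGetD ref (j : Int) ' ') q n n (le_refl n)]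
    have hmid : (List.range n).map (fun j => if j < n ∧ PySem.List.pyGetD s.toList (j : Int) ' ' ≠ PySem.List.pyGetD ref (j : Int) ' ' then 'X' else if q j then '|' else 'X')
        = (List.range n).map (fun j => if (fun j => q j && (PySem.List.pyGetD s.toList (j : Int) ' ' == PySem.List.pyGetD ref (j : Int) ' ')) j then '|' else 'X') := by
      apply List.map_congr_left
      intro j hj
      have hjn : j < n := List.mem_range.mp hj
      by_cases he : PySem.List.pyGetD s.toList (j : Int) ' ' = PySem.List.pyGetD ref (j : Int) ' ' <;>
        by_cases hq : q j <;> simp [he, hq, hjn]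
    rw [hmid, ih]
    apply List.map_congr_left
    intro j hj
    simp [Bool.and_assoc]

-- B reduced to the same normal form
theorem B_char (s0 : String) (rest : List String) :
    create_alignment_alt (s0 :: rest) = String.ofList (colmap s0.toList rest) := by
  unfold create_alignment_alt colmap
  have hget0 : PySem.List.pyGetD (s0 :: rest) 0 "" = s0 := by
    simp [PySem.List.pyGetD, PySem.List.pyGet?, PySem.List.pyIdx?]
  simp only [hget0]
  rw [PySem.List.slice_from (s0 :: rest) (by norm_num)]
  simp only [Int.toNat_one, List.drop_one, List.tail_cons]
  have hrep : List.replicate s0.toList.length '|'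
      = (List.range s0.toList.length).map (fun j => if (fun _ : Nat => true) j then '|' else 'X') := by
    simp [List.map_const']
  rw [hrep]
  have hstep : ∀ (res : List Char), ∀ s ∈ rest,
      (PySem.List.pyRange 0 (s0.toList.length : Int) 1).foldl (fun r i =>
          if PySem.List.pyGetD s.toList i ' ' ≠ PySem.List.pyGetD s0.toList i ' '
          then r.set i.toNat 'X' else r) res
        = (List.range s0.toList.length).foldl (fun (r : List Char) (j : Nat) =>
            if PySem.List.pyGetD s.toList (j : Int) ' ' ≠ PySem.List.pyGetD s0.toList (j : Int) ' '
            then r.set j 'X' else r) res := by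
    intro res s _
    rw [PySem.List.pyRange_zero_nat, List.foldl_map]
    simp only [Int.toNat_natCast]
  rw [List.foldl_ext _ _ _ hstep]
  rw [outer_fold s0.toList s0.toList.length rest (fun _ => true)]
  simp only [Bool.true_and]

-- ===== VERDICT (by name: the statement is the Claim_ definition above) =====
theorem create_alignment_spec : Claim_equal_create_alignment := by
  intro sequences _ hpre
  cases sequences with
  | nil => exact absurd rfl hpre.1
  | cons s0 rest =>
    unfold Spec_create_alignment
    rw [A_char, B_char]
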